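-- pv_equiv track=rewrite | github.com/oranguthang/pacman_src | scripts/workflow/compare_progress_capture.py | diff_ascii_screens
-- ===== SOURCE A (Python) =====
-- from collections import Counter
--
-- def diff_ascii_screens(
--     run_lines: list[str], ref_lines: list[str]
-- ) -> tuple[list[tuple[int, int, str, str]], int, int]:
--     tile_diffs: list[tuple[int, int, str, str]] = []
--
--     def norm_ch(ch: str) -> str:
--         # In Pac-Man captures, blank-looking background may be emitted as either
--         # space or '-' depending on tile IDs/palette usage; treat them as equal.
--         if ch == "-":
--             return " "
--         return ch
--
--     height = min(len(run_lines), len(ref_lines))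
--     width = 32
--
--     for y in range(height):
--         run_row = run_lines[y]
--         ref_row = ref_lines[y]
--         row_w = min(len(run_row), len(ref_row), width)
--         for x in range(row_w):
--             rc = run_row[x]
--             oc = ref_row[x]
--             if norm_ch(rc) != norm_ch(oc):
--                 tile_diffs.append((y, x, rc, oc))
--         if len(run_row) != len(ref_row):
--             max_w = max(len(run_row), len(ref_row), width)
--             for x in range(row_w, min(max_w, width)):
--                 rc = run_row[x] if x < len(run_row) else " "
--                 oc = ref_row[x] if x < len(ref_row) else " "
--                 if norm_ch(rc) != norm_ch(oc):
--                     tile_diffs.append((y, x, rc, oc))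
--
--     if len(run_lines) != len(ref_lines):
--         for y in range(height, min(max(len(run_lines), len(ref_lines)), 30)):
--             run_row = run_lines[y] if y < len(run_lines) else ""
--             ref_row = ref_lines[y] if y < len(ref_lines) else ""
--             for x in range(width):
--                 rc = run_row[x] if x < len(run_row) else " "
--                 oc = ref_row[x] if x < len(ref_row) else " "
--                 if norm_ch(rc) != norm_ch(oc):
--                     tile_diffs.append((y, x, rc, oc))
--
--     run_counts = Counter(norm_ch(c) for c in "".join(run_lines))
--     ref_counts = Counter(norm_ch(c) for c in "".join(ref_lines))
--     shift_char_count = 0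
--     count_delta_chars = 0
--     chars = set(run_counts) | set(ref_counts)
--     for ch in chars:
--         if run_counts[ch] == ref_counts[ch]:
--             if run_counts[ch] > 0:
--                 run_pos = []
--                 ref_pos = []
--                 for y, row in enumerate(run_lines[:30]):
--                     for x, c in enumerate(row[:32]):
--                         if norm_ch(c) == ch:
--                             run_pos.append((y, x))
--                 for y, row in enumerate(ref_lines[:30]):
--                     for x, c in enumerate(row[:32]):
--                         if norm_ch(c) == ch:
--                             ref_pos.append((y, x))
--                 if run_pos != ref_pos:
--                     shift_char_count += 1
--         else:
--             count_delta_chars += 1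
--
--     return tile_diffs, shift_char_count, count_delta_chars
-- ===== SOURCE B (Python) =====
-- from collections import Counter
--
--
-- def diff_ascii_screens(
--     run_lines: list[str], ref_lines: list[str]
-- ) -> tuple[list[tuple[int, int, str, str]], int, int]:
--     WIDTH = 32
--
--     def norm_ch(ch: str) -> str:
--         return " " if ch == "-" else ch
--
--     def cell(row: str, x: int) -> str:
--         return row[x] if x < len(row) else " "
--
--     height = min(len(run_lines), len(ref_lines))
--     total_rows = max(height, min(max(len(run_lines), len(ref_lines)), 30))
--
--     tile_diffs: list[tuple[int, int, str, str]] = []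
--     for y in range(total_rows):
--         run_row = run_lines[y] if y < len(run_lines) else ""
--         ref_row = ref_lines[y] if y < len(ref_lines) else ""
--         limit = min(len(run_row), WIDTH) if len(run_row) == len(ref_row) else WIDTH
--         for x in range(limit):
--             rc = cell(run_row, x)
--             oc = cell(ref_row, x)
--             if norm_ch(rc) != norm_ch(oc):
--                 tile_diffs.append((y, x, rc, oc))
--
--     run_counts = Counter(norm_ch(c) for c in "".join(run_lines))
--     ref_counts = Counter(norm_ch(c) for c in "".join(ref_lines))
--
--     run_positions: dict[str, list[tuple[int, int]]] = {}
--     for y, row in enumerate(run_lines[:30]):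
--         for x, c in enumerate(row[:32]):
--             run_positions.setdefault(norm_ch(c), []).append((y, x))
--     ref_positions: dict[str, list[tuple[int, int]]] = {}
--     for y, row in enumerate(ref_lines[:30]):
--         for x, c in enumerate(row[:32]):
--             ref_positions.setdefault(norm_ch(c), []).append((y, x))
--
--     shift_char_count = 0
--     count_delta_chars = 0
--     for ch in set(run_counts) | set(ref_counts):
--         if run_counts[ch] == ref_counts[ch]:
--             if run_counts[ch] > 0 and run_positions.get(ch, []) != ref_positions.get(ch, []):
--                 shift_char_count += 1
--         else:
--             count_delta_chars += 1
--
--     return tile_diffs, shift_char_count, count_delta_chars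
-- ===== Notes on version B (the rewrite author's own statement) =====
-- stated objective: simpler
-- what changed: The three separate tile-diff loops (common rows, ragged row tails, extra rows) collapse into one unified padded-row loop, and the per-character rescan of both grids inside the chars loop is replaced by position-index dicts built in a single pass over each grid, so each grid is traversed once instead of once per distinct character.
import Mathlib
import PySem

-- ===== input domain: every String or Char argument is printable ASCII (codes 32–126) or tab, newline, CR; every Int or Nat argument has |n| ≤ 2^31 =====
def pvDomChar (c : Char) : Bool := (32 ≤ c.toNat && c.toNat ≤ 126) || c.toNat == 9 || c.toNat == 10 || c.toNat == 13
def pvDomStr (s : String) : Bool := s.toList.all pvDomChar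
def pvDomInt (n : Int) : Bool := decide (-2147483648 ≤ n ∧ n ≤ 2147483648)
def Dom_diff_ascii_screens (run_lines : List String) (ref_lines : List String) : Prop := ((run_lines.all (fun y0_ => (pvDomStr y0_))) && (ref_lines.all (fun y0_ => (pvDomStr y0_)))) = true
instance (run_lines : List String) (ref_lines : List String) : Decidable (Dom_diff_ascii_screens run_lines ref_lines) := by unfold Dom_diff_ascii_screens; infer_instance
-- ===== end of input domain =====

-- B merges A's three tile-diff loops into one padded-row loop and replaces A's per-character
-- rescan of both grids by position-index dicts built in a single pass (objective: simpler).

-- ===== PORT A =====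
-- shared helpers (both Pythons contain these exact expressions: A inline, B as local defs)
def pvNorm (c : Char) : Char := if c = '-' then ' ' else c                       -- norm_ch
def pvCell (r : List Char) (x : Int) : Char :=                                    -- row[x] if x < len(row) else " "
  if x < (r.length : Int) then PySem.List.pyGetD r x ' ' else ' '
def pvRowAt (lines : List String) (y : Int) : List Char :=                        -- lines[y] if y < len(lines) else ""
  (if y < (lines.length : Int) then PySem.List.pyGetD lines y "" else "").toList
def pvCounts (lines : List String) : PySem.Dict Char Int :=                       -- Counter(norm_ch(c) for c in "".join(lines))
  PySem.Dict.counter ((PySem.Str.join "" lines).toList.map pvNorm)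

-- A's per-character position scan (the run_pos / ref_pos nested loops)
def pvScanPos (lines : List String) (ch : Char) : List (Int × Int) :=
  (PySem.List.enumerate (PySem.List.slice lines none (some 30)) 0).foldl (fun acc yr =>
    (PySem.List.enumerate (PySem.List.slice yr.2.toList none (some 32)) 0).foldl (fun acc xc =>
      if pvNorm xc.2 == ch then acc ++ [(yr.1, xc.1)] else acc) acc) []

def diff_ascii_screens (run_lines : List String) (ref_lines : List String) : (List (Int × Int × String × String)) × Int × Int :=
  let height : Int := min (run_lines.length : Int) (ref_lines.length : Int)
  let width : Int := 32
  -- for y in range(height): per-row compare, then the ragged-width tail when row lengths differ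
  let td1 : List (Int × Int × String × String) :=
    (PySem.List.pyRange 0 height 1).foldl (fun acc y =>
      let run_row := (PySem.List.pyGetD run_lines y "").toList
      let ref_row := (PySem.List.pyGetD ref_lines y "").toList
      let row_w : Int := min (min (run_row.length : Int) (ref_row.length : Int)) width
      let acc := (PySem.List.pyRange 0 row_w 1).foldl (fun acc x =>
        let rc := PySem.List.pyGetD run_row x ' '
        let oc := PySem.List.pyGetD ref_row x ' '
        if pvNorm rc != pvNorm oc then acc ++ [(y, x, String.ofList [rc], String.ofList [oc])] else acc) acc
      if (run_row.length : Int) ≠ (ref_row.length : Int) then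
        let max_w : Int := max (max (run_row.length : Int) (ref_row.length : Int)) width
        (PySem.List.pyRange row_w (min max_w width) 1).foldl (fun acc x =>
          let rc := pvCell run_row x
          let oc := pvCell ref_row x
          if pvNorm rc != pvNorm oc then acc ++ [(y, x, String.ofList [rc], String.ofList [oc])] else acc) acc
      else acc) []
  -- extra rows when the screens have different numbers of lines
  let tile_diffs : List (Int × Int × String × String) :=
    if (run_lines.length : Int) ≠ (ref_lines.length : Int) then
      (PySem.List.pyRange height (min (max (run_lines.length : Int) (ref_lines.length : Int)) 30) 1).foldl (fun acc y =>
        let run_row := pvRowAt run_lines y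
        let ref_row := pvRowAt ref_lines y
        (PySem.List.pyRange 0 width 1).foldl (fun acc x =>
          let rc := pvCell run_row x
          let oc := pvCell ref_row x
          if pvNorm rc != pvNorm oc then acc ++ [(y, x, String.ofList [rc], String.ofList [oc])] else acc) acc) td1
    else td1
  let run_counts := pvCounts run_lines
  let ref_counts := pvCounts ref_lines
  let chars := PySem.Set.union (PySem.Set.ofList run_counts.keys) ref_counts.keys
  let sc : Int × Int := chars.foldl (fun (p : Int × Int) ch =>
    if run_counts.getD ch 0 = ref_counts.getD ch 0 then
      if run_counts.getD ch 0 > 0 then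
        let run_pos := pvScanPos run_lines ch
        let ref_pos := pvScanPos ref_lines ch
        if run_pos ≠ ref_pos then (p.1 + 1, p.2) else p
      else p
    else (p.1, p.2 + 1)) (0, 0)
  (tile_diffs, sc.1, sc.2)

-- ===== PORT B =====
-- B's one-pass position index: positions.setdefault(norm_ch(c), []).append((y, x))
def pvBuildPos (lines : List String) : PySem.Dict Char (List (Int × Int)) :=
  (PySem.List.enumerate (PySem.List.slice lines none (some 30)) 0).foldl (fun d yr =>
    (PySem.List.enumerate (PySem.List.slice yr.2.toList none (some 32)) 0).foldl (fun d xc =>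
      d.insert (pvNorm xc.2) (d.getD (pvNorm xc.2) [] ++ [(yr.1, xc.1)])) d) PySem.Dict.empty

def diff_ascii_screens_alt (run_lines : List String) (ref_lines : List String) : (List (Int × Int × String × String)) × Int × Int :=
  let width : Int := 32
  let height : Int := min (run_lines.length : Int) (ref_lines.length : Int)
  let total_rows : Int := max height (min (max (run_lines.length : Int) (ref_lines.length : Int)) 30)
  let tile_diffs : List (Int × Int × String × String) :=
    (PySem.List.pyRange 0 total_rows 1).foldl (fun acc y =>
      let run_row := pvRowAt run_lines y
      let ref_row := pvRowAt ref_lines y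
      let limit : Int := if (run_row.length : Int) = (ref_row.length : Int) then min (run_row.length : Int) width else width
      (PySem.List.pyRange 0 limit 1).foldl (fun acc x =>
        let rc := pvCell run_row x
        let oc := pvCell ref_row x
        if pvNorm rc != pvNorm oc then acc ++ [(y, x, String.ofList [rc], String.ofList [oc])] else acc) acc) []
  let run_counts := pvCounts run_lines
  let ref_counts := pvCounts ref_lines
  let run_positions := pvBuildPos run_lines
  let ref_positions := pvBuildPos ref_lines
  let sc : Int × Int :=
    (PySem.Set.union (PySem.Set.ofList run_counts.keys) ref_counts.keys).foldl (fun (p : Int × Int) ch =>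
      if run_counts.getD ch 0 = ref_counts.getD ch 0 then
        if run_counts.getD ch 0 > 0 ∧ run_positions.getD ch [] ≠ ref_positions.getD ch [] then
          (p.1 + 1, p.2)
        else p
      else (p.1, p.2 + 1)) (0, 0)
  (tile_diffs, sc.1, sc.2)

-- ===== PRECONDITION & SPEC =====
def Spec_diff_ascii_screens (run_lines : List String) (ref_lines : List String) (out : (List (Int × Int × String × String)) × Int × Int) : Prop := out = diff_ascii_screens_alt run_lines ref_lines
instance (run_lines : List String) (ref_lines : List String) (out : (List (Int × Int × String × String)) × Int × Int) : Decidable (Spec_diff_ascii_screens run_lines ref_lines out) := by unfold Spec_diff_ascii_screens; infer_instance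

-- ===== CLAIM (what is proved, stated in full; the proofs are below) =====
def Claim_equal_diff_ascii_screens : Prop := ∀ (run_lines : List String) (ref_lines : List String), Dom_diff_ascii_screens run_lines ref_lines → Spec_diff_ascii_screens run_lines ref_lines (diff_ascii_screens run_lines ref_lines)

-- ===== LEMMAS AND PROOFS =====

-- a padded row-compare chunk over the column range [a, b)
def pvChunk (y : Int) (r f : List Char) (a b : Int) : List (Int × Int × String × String) :=
  ((PySem.List.pyRange a b 1).filter (fun x => pvNorm (pvCell r x) != pvNorm (pvCell f x))).map
    (fun x => (y, x, String.ofList [pvCell r x], String.ofList [pvCell f x]))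

def pvLimit (r f : List Char) : Int :=
  if (r.length : Int) = (f.length : Int) then min (r.length : Int) 32 else 32

-- B's per-row contribution
def pvGRow (run_lines ref_lines : List String) (y : Int) : List (Int × Int × String × String) :=
  pvChunk y (pvRowAt run_lines y) (pvRowAt ref_lines y) 0
    (pvLimit (pvRowAt run_lines y) (pvRowAt ref_lines y))

-- A's per-row contribution for a common row y < height
def pvARow (run_lines ref_lines : List String) (y : Int) : List (Int × Int × String × String) :=
  (((PySem.List.pyRange 0 (min (min (((PySem.List.pyGetD run_lines y "").toList.length) : Int)
        (((PySem.List.pyGetD ref_lines y "").toList.length) : Int)) 32) 1).filter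
      (fun x => pvNorm (PySem.List.pyGetD (PySem.List.pyGetD run_lines y "").toList x ' ')
        != pvNorm (PySem.List.pyGetD (PySem.List.pyGetD ref_lines y "").toList x ' '))).map
    (fun x => (y, x, String.ofList [PySem.List.pyGetD (PySem.List.pyGetD run_lines y "").toList x ' '],
      String.ofList [PySem.List.pyGetD (PySem.List.pyGetD ref_lines y "").toList x ' ']))) ++
  (if (((PySem.List.pyGetD run_lines y "").toList.length) : Int)
      ≠ (((PySem.List.pyGetD ref_lines y "").toList.length) : Int) then
     pvChunk y (PySem.List.pyGetD run_lines y "").toList (PySem.List.pyGetD ref_lines y "").toList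
       (min (min (((PySem.List.pyGetD run_lines y "").toList.length) : Int)
         (((PySem.List.pyGetD ref_lines y "").toList.length) : Int)) 32)
       (min (max (max (((PySem.List.pyGetD run_lines y "").toList.length) : Int)
         (((PySem.List.pyGetD ref_lines y "").toList.length) : Int)) 32) 32)
   else [])

-- A's per-row contribution for an extra row y ≥ height
def pvXRow (run_lines ref_lines : List String) (y : Int) : List (Int × Int × String × String) :=
  pvChunk y (pvRowAt run_lines y) (pvRowAt ref_lines y) 0 32

theorem altTiles_eq (run_lines ref_lines : List String) :
    (diff_ascii_screens_alt run_lines ref_lines).1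
    = (PySem.List.pyRange 0 (max (min (run_lines.length : Int) (ref_lines.length : Int))
        (min (max (run_lines.length : Int) (ref_lines.length : Int)) 30)) 1).flatMap
        (pvGRow run_lines ref_lines) := by
  simp only [diff_ascii_screens_alt]
  have hstep : ∀ (acc : List (Int × Int × String × String)) (y : Int),
      (PySem.List.pyRange 0 (if ((pvRowAt run_lines y).length : Int) = ((pvRowAt ref_lines y).length : Int)
          then min ((pvRowAt run_lines y).length : Int) 32 else 32) 1).foldl (fun acc x =>
        if (pvNorm (pvCell (pvRowAt run_lines y) x) != pvNorm (pvCell (pvRowAt ref_lines y) x)) = true then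
          acc ++ [(y, x, String.ofList [pvCell (pvRowAt run_lines y) x],
                    String.ofList [pvCell (pvRowAt ref_lines y) x])]
        else acc) acc
      = acc ++ pvGRow run_lines ref_lines y := by
    intro acc y
    rw [PySem.List.foldl_append_if]
    rfl
  rw [PySem.List.foldl_congr_mem _ _ (fun acc y => acc ++ pvGRow run_lines ref_lines y) _
      (fun acc y _ => hstep acc y)]
  rw [PySem.List.foldl_append_eq_flatMap]
  rfl

theorem aTiles_eq (run_lines ref_lines : List String) :
    (diff_ascii_screens run_lines ref_lines).1
    = (PySem.List.pyRange 0 (min (run_lines.length : Int) (ref_lines.length : Int)) 1).flatMap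
        (pvARow run_lines ref_lines) ++
      (if (run_lines.length : Int) ≠ (ref_lines.length : Int) then
         (PySem.List.pyRange (min (run_lines.length : Int) (ref_lines.length : Int))
            (min (max (run_lines.length : Int) (ref_lines.length : Int)) 30) 1).flatMap
           (pvXRow run_lines ref_lines)
       else []) := by
  simp only [diff_ascii_screens]
  have hstep1 : ∀ (acc : List (Int × Int × String × String)) (y : Int),
      (if ((PySem.List.pyGetD run_lines y "").toList.length : Int)
            ≠ ((PySem.List.pyGetD ref_lines y "").toList.length : Int) then
         (PySem.List.pyRange (min (min ((PySem.List.pyGetD run_lines y "").toList.length : Int)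
              ((PySem.List.pyGetD ref_lines y "").toList.length : Int)) 32)
            (min (max (max ((PySem.List.pyGetD run_lines y "").toList.length : Int)
              ((PySem.List.pyGetD ref_lines y "").toList.length : Int)) 32) 32) 1).foldl (fun acc x =>
           if (pvNorm (pvCell (PySem.List.pyGetD run_lines y "").toList x)
                != pvNorm (pvCell (PySem.List.pyGetD ref_lines y "").toList x)) = true then
             acc ++ [(y, x, String.ofList [pvCell (PySem.List.pyGetD run_lines y "").toList x],
                       String.ofList [pvCell (PySem.List.pyGetD ref_lines y "").toList x])]
           else acc)
          ((PySem.List.pyRange 0 (min (min ((PySem.List.pyGetD run_lines y "").toList.length : Int)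
              ((PySem.List.pyGetD ref_lines y "").toList.length : Int)) 32) 1).foldl (fun acc x =>
            if (pvNorm (PySem.List.pyGetD (PySem.List.pyGetD run_lines y "").toList x ' ')
                 != pvNorm (PySem.List.pyGetD (PySem.List.pyGetD ref_lines y "").toList x ' ')) = true then
              acc ++ [(y, x, String.ofList [PySem.List.pyGetD (PySem.List.pyGetD run_lines y "").toList x ' '],
                        String.ofList [PySem.List.pyGetD (PySem.List.pyGetD ref_lines y "").toList x ' '])]
            else acc) acc)
       else
         (PySem.List.pyRange 0 (min (min ((PySem.List.pyGetD run_lines y "").toList.length : Int)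
              ((PySem.List.pyGetD ref_lines y "").toList.length : Int)) 32) 1).foldl (fun acc x =>
           if (pvNorm (PySem.List.pyGetD (PySem.List.pyGetD run_lines y "").toList x ' ')
                != pvNorm (PySem.List.pyGetD (PySem.List.pyGetD ref_lines y "").toList x ' ')) = true then
             acc ++ [(y, x, String.ofList [PySem.List.pyGetD (PySem.List.pyGetD run_lines y "").toList x ' '],
                       String.ofList [PySem.List.pyGetD (PySem.List.pyGetD ref_lines y "").toList x ' '])]
           else acc) acc)
      = acc ++ pvARow run_lines ref_lines y := by
    intro acc y
    simp only [pvARow]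
    by_cases h : ((PySem.List.pyGetD run_lines y "").toList.length : Int)
        ≠ ((PySem.List.pyGetD ref_lines y "").toList.length : Int)
    · rw [if_pos h, if_pos h, PySem.List.foldl_append_if, PySem.List.foldl_append_if,
          List.append_assoc]
      rfl
    · rw [if_neg h, if_neg h, PySem.List.foldl_append_if, List.append_nil]
  have hstep2 : ∀ (acc : List (Int × Int × String × String)) (y : Int),
      (PySem.List.pyRange 0 32 1).foldl (fun acc x =>
        if (pvNorm (pvCell (pvRowAt run_lines y) x) != pvNorm (pvCell (pvRowAt ref_lines y) x)) = true then
          acc ++ [(y, x, String.ofList [pvCell (pvRowAt run_lines y) x],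
                    String.ofList [pvCell (pvRowAt ref_lines y) x])]
        else acc) acc
      = acc ++ pvXRow run_lines ref_lines y := by
    intro acc y
    rw [PySem.List.foldl_append_if]
    rfl
  rw [PySem.List.foldl_congr_mem _ _ (fun acc y => acc ++ pvARow run_lines ref_lines y) _
      (fun acc y _ => hstep1 acc y)]
  rw [PySem.List.foldl_append_eq_flatMap]
  by_cases hlen : (run_lines.length : Int) ≠ (ref_lines.length : Int)
  · rw [if_pos hlen, if_pos hlen]
    rw [PySem.List.foldl_congr_mem _ _ (fun acc y => acc ++ pvXRow run_lines ref_lines y) _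
        (fun acc y _ => hstep2 acc y)]
    rw [PySem.List.foldl_append_eq_flatMap]
    rfl
  · rw [if_neg hlen, if_neg hlen, List.append_nil, List.nil_append]

-- on [a, b) with b within both rows, the raw (unpadded) chunk is the padded chunk
theorem chunk_raw (y : Int) (r f : List Char) (b : Int)
    (hr : b ≤ (r.length : Int)) (hf : b ≤ (f.length : Int)) :
    ((PySem.List.pyRange 0 b 1).filter
        (fun x => pvNorm (PySem.List.pyGetD r x ' ') != pvNorm (PySem.List.pyGetD f x ' '))).map
      (fun x => (y, x, String.ofList [PySem.List.pyGetD r x ' '], String.ofList [PySem.List.pyGetD f x ' ']))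
    = pvChunk y r f 0 b := by
  have hcell : ∀ x ∈ PySem.List.pyRange 0 b 1,
      pvCell r x = PySem.List.pyGetD r x ' ' ∧ pvCell f x = PySem.List.pyGetD f x ' ' := by
    intro x hx
    rcases PySem.List.mem_pyRange_one.mp hx with ⟨_, hxb⟩
    exact ⟨if_pos (by omega), if_pos (by omega)⟩
  unfold pvChunk
  have hfil : List.filter (fun x => pvNorm (pvCell r x) != pvNorm (pvCell f x)) (PySem.List.pyRange 0 b 1)
      = List.filter (fun x => pvNorm (PySem.List.pyGetD r x ' ') != pvNorm (PySem.List.pyGetD f x ' '))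
          (PySem.List.pyRange 0 b 1) :=
    List.filter_congr (fun x hx => by rw [(hcell x hx).1, (hcell x hx).2])
  rw [hfil]
  exact List.map_congr_left (fun x hx => by
    have hm := hcell x (List.mem_filter.mp hx).1
    rw [hm.1, hm.2])

theorem common_row_eq (run_lines ref_lines : List String) (y : Int)
    (_h0 : 0 ≤ y) (hy : y < min (run_lines.length : Int) (ref_lines.length : Int)) :
    pvARow run_lines ref_lines y = pvGRow run_lines ref_lines y := by
  have hrow : pvRowAt run_lines y = (PySem.List.pyGetD run_lines y "").toList := by
    unfold pvRowAt; rw [if_pos (by omega)]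
  have frow : pvRowAt ref_lines y = (PySem.List.pyGetD ref_lines y "").toList := by
    unfold pvRowAt; rw [if_pos (by omega)]
  unfold pvARow pvGRow pvLimit
  rw [hrow, frow]
  set r := (PySem.List.pyGetD run_lines y "").toList with hr
  set f := (PySem.List.pyGetD ref_lines y "").toList with hf
  by_cases h : (r.length : Int) = (f.length : Int)
  · rw [if_neg (not_not_intro h), if_pos h, List.append_nil]
    have hw : min (min (r.length : Int) (f.length : Int)) 32 = min (r.length : Int) 32 := by omega
    rw [hw, chunk_raw y r f _ (by omega) (by omega)]
  · rw [if_pos h, if_neg h]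
    have h32 : min (max (max (r.length : Int) (f.length : Int)) 32) 32 = 32 := by omega
    rw [h32]
    have hsplit : PySem.List.pyRange 0 32 1
        = PySem.List.pyRange 0 (min (min (r.length : Int) (f.length : Int)) 32) 1
          ++ PySem.List.pyRange (min (min (r.length : Int) (f.length : Int)) 32) 32 1 :=
      PySem.List.pyRange_one_append _ _ _ (by omega) (by omega)
    conv_rhs => rw [pvChunk, hsplit, List.filter_append, List.map_append]
    rw [chunk_raw y r f _ (by omega) (by omega)]
    rfl

theorem extra_row_eq (run_lines ref_lines : List String) (y : Int)
    (hy : min (run_lines.length : Int) (ref_lines.length : Int) ≤ y) :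
    pvXRow run_lines ref_lines y = pvGRow run_lines ref_lines y := by
  unfold pvXRow pvGRow pvLimit
  set r := pvRowAt run_lines y with hr
  set f := pvRowAt ref_lines y with hf
  by_cases h : (r.length : Int) = (f.length : Int)
  · -- one of the screens is exhausted at y, so equal lengths force both rows empty
    have hempty : r = [] ∧ f = [] := by
      have : (run_lines.length : Int) ≤ y ∨ (ref_lines.length : Int) ≤ y := by omega
      rcases this with hc | hc
      · have hr0 : r = [] := by
          rw [hr]; unfold pvRowAt; rw [if_neg (by omega)]; rfl
        exact ⟨hr0, List.length_eq_zero_iff.mp (by have := h; rw [hr0] at this; simpa using this.symm)⟩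
      · have hf0 : f = [] := by
          rw [hf]; unfold pvRowAt; rw [if_neg (by omega)]; rfl
        exact ⟨List.length_eq_zero_iff.mp (by have := h; rw [hf0] at this; simpa using this), hf0⟩
    rw [if_pos h, hempty.1, hempty.2]
    unfold pvChunk pvCell
    simp
  · rw [if_neg h]

theorem tile_eq (run_lines ref_lines : List String) :
    (diff_ascii_screens run_lines ref_lines).1 = (diff_ascii_screens_alt run_lines ref_lines).1 := by
  rw [aTiles_eq, altTiles_eq]
  set hei : Int := min (run_lines.length : Int) (ref_lines.length : Int) with hhei
  set m : Int := min (max (run_lines.length : Int) (ref_lines.length : Int)) 30 with hm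
  have h0 : (0 : Int) ≤ hei := by omega
  have hsplit : PySem.List.pyRange 0 (max hei m) 1
      = PySem.List.pyRange 0 hei 1 ++ PySem.List.pyRange hei (max hei m) 1 :=
    PySem.List.pyRange_one_append _ _ _ (by omega) (by omega)
  rw [hsplit, List.flatMap_append]
  congr 1
  · exact List.flatMap_congr (fun y hy => by
      rcases PySem.List.mem_pyRange_one.mp hy with ⟨h1, h2⟩
      exact common_row_eq run_lines ref_lines y h1 h2)
  · by_cases hlen : (run_lines.length : Int) ≠ (ref_lines.length : Int)
    · rw [if_pos hlen]
      by_cases hmh : m ≤ hei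
      · rw [PySem.List.pyRange_one_eq_nil hmh,
            PySem.List.pyRange_one_eq_nil (by omega : max hei m ≤ hei)]
        rfl
      · have : max hei m = m := by omega
        rw [this]
        exact List.flatMap_congr (fun y hy => by
          rcases PySem.List.mem_pyRange_one.mp hy with ⟨h1, _⟩
          exact extra_row_eq run_lines ref_lines y h1)
    · rw [if_neg hlen]
      have : max hei m = hei := by omega
      rw [this, PySem.List.pyRange_one_eq_nil (by omega)]
      rfl

-- ---- position index = per-character scan ----

theorem bucket_row (cells : List (Int × Char)) (d : PySem.Dict Char (List (Int × Int)))
    (y : Int) (ch : Char) :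
    (cells.foldl (fun d xc => d.insert (pvNorm xc.2) (d.getD (pvNorm xc.2) [] ++ [(y, xc.1)])) d).getD ch []
    = d.getD ch [] ++ (cells.filter (fun xc => pvNorm xc.2 == ch)).map (fun xc => (y, xc.1)) := by
  induction cells generalizing d with
  | nil => simp
  | cons c t ih =>
    simp only [List.foldl_cons, ih, List.filter_cons]
    by_cases h : pvNorm c.2 = ch
    · simp [h]
    · simp [PySem.Dict.getD_insert, h, Ne.symm h]

theorem scan_flat (rows : List (Int × String)) (acc : List (Int × Int)) (ch : Char) :
    rows.foldl (fun acc yr =>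
        (PySem.List.enumerate (PySem.List.slice yr.2.toList none (some 32)) 0).foldl (fun acc xc =>
          if pvNorm xc.2 == ch then acc ++ [(yr.1, xc.1)] else acc) acc) acc
    = acc ++ rows.flatMap (fun yr =>
        ((PySem.List.enumerate (PySem.List.slice yr.2.toList none (some 32)) 0).filter
            (fun xc => pvNorm xc.2 == ch)).map (fun xc => (yr.1, xc.1))) := by
  induction rows generalizing acc with
  | nil => simp
  | cons yr t ih =>
    simp only [List.foldl_cons, List.flatMap_cons]
    rw [PySem.List.foldl_append_if, ih, List.append_assoc]

theorem bucket_flat (rows : List (Int × String)) (d : PySem.Dict Char (List (Int × Int))) (ch : Char) :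
    (rows.foldl (fun d yr =>
        (PySem.List.enumerate (PySem.List.slice yr.2.toList none (some 32)) 0).foldl (fun d xc =>
          d.insert (pvNorm xc.2) (d.getD (pvNorm xc.2) [] ++ [(yr.1, xc.1)])) d) d).getD ch []
    = d.getD ch [] ++ rows.flatMap (fun yr =>
        ((PySem.List.enumerate (PySem.List.slice yr.2.toList none (some 32)) 0).filter
            (fun xc => pvNorm xc.2 == ch)).map (fun xc => (yr.1, xc.1))) := by
  induction rows generalizing d with
  | nil => simp
  | cons yr t ih =>
    simp only [List.foldl_cons, List.flatMap_cons]
    rw [ih, bucket_row, List.append_assoc]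

theorem buildPos_getD (lines : List String) (ch : Char) :
    (pvBuildPos lines).getD ch [] = pvScanPos lines ch := by
  unfold pvBuildPos pvScanPos
  rw [bucket_flat, scan_flat, PySem.Dict.getD_empty]

theorem sc_eq (run_lines ref_lines : List String) :
    (diff_ascii_screens run_lines ref_lines).2 = (diff_ascii_screens_alt run_lines ref_lines).2 := by
  simp only [diff_ascii_screens, diff_ascii_screens_alt]
  rw [PySem.List.foldl_congr_mem _ _
      (fun (p : Int × Int) ch =>
        if (pvCounts run_lines).getD ch 0 = (pvCounts ref_lines).getD ch 0 then
          if (pvCounts run_lines).getD ch 0 > 0 ∧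
              (pvBuildPos run_lines).getD ch [] ≠ (pvBuildPos ref_lines).getD ch [] then
            (p.1 + 1, p.2)
          else p
        else (p.1, p.2 + 1)) _ ?_]
  intro p ch _
  beta_reduce
  rw [buildPos_getD, buildPos_getD]
  by_cases h1 : (pvCounts run_lines).getD ch 0 = (pvCounts ref_lines).getD ch 0
  · rw [if_pos h1, if_pos h1]
    by_cases h2 : (pvCounts run_lines).getD ch 0 > 0
    · rw [if_pos h2]
      by_cases h3 : pvScanPos run_lines ch ≠ pvScanPos ref_lines ch
      · rw [if_pos h3, if_pos ⟨h2, h3⟩]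
      · rw [if_neg h3, if_neg (by tauto)]
    · rw [if_neg h2, if_neg (by tauto)]
  · rw [if_neg h1, if_neg h1]

-- ===== VERDICT (by name: the statement is the Claim_ definition above) =====
theorem diff_ascii_screens_spec : Claim_equal_diff_ascii_screens := by
  intro rl fl _
  unfold Spec_diff_ascii_screens
  exact Prod.ext (tile_eq rl fl) (sc_eq rl fl)
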